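-- pv_equiv track=rewrite | github.com/jameshgrn/dgov | src/dgov/cli/run.py | _classify_task_results
-- ===== SOURCE A (Python) =====
-- def _classify_task_results(
--     results: dict[str, str],
-- ) -> tuple[list[str], list[str], list[str], list[str]]:
--     failed = [slug for slug, status in results.items() if status == "failed"]
--     abandoned = [slug for slug, status in results.items() if status in ("abandoned", "timed_out")]
--     skipped = [slug for slug, status in results.items() if status == "skipped"]
--     succeeded = [slug for slug, status in results.items() if status == "merged"]
--     return failed, abandoned, skipped, succeeded
-- ===== SOURCE B (Python) =====
-- def _classify_task_results(
--     results: dict[str, str],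
-- ) -> tuple[list[str], list[str], list[str], list[str]]:
--     failed: list[str] = []
--     abandoned: list[str] = []
--     skipped: list[str] = []
--     succeeded: list[str] = []
--     for slug, status in results.items():
--         if status == "failed":
--             failed.append(slug)
--         elif status in ("abandoned", "timed_out"):
--             abandoned.append(slug)
--         elif status == "skipped":
--             skipped.append(slug)
--         elif status == "merged":
--             succeeded.append(slug)
--     return failed, abandoned, skipped, succeeded
-- ===== Notes on version B (the rewrite author's own statement) =====
-- stated objective: simpler
-- what changed: Replaces four separate comprehension passes over results.items() with a single loop that appends each slug to the matching bucket via an if/elif chain.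
import Mathlib
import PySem

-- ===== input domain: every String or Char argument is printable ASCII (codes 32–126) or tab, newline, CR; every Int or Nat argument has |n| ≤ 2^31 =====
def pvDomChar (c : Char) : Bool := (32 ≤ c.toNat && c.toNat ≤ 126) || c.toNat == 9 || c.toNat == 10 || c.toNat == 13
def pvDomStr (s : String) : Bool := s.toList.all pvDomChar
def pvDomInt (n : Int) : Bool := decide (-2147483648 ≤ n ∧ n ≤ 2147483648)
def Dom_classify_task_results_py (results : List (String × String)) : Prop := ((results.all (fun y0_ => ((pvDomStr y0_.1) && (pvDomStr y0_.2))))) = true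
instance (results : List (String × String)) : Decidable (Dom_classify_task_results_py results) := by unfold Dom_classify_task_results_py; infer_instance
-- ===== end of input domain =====

-- B replaces A's four comprehension passes with one loop and an if/elif chain (objective: simpler, one pass).


-- ===== PORT A =====
-- Four comprehensions over results.items(), one per bucket.
def classify_task_results_py (results : List (String × String)) : List String × List String × List String × List String :=
  let failed := results.filterMap (fun p => if p.2 = "failed" then some p.1 else none)
  let abandoned := results.filterMap (fun p => if p.2 = "abandoned" ∨ p.2 = "timed_out" then some p.1 else none)
  let skipped := results.filterMap (fun p => if p.2 = "skipped" then some p.1 else none)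
  let succeeded := results.filterMap (fun p => if p.2 = "merged" then some p.1 else none)
  (failed, abandoned, skipped, succeeded)

-- ===== PORT B =====
-- One pass: fold over the items, appending the slug to the bucket the if/elif chain selects.
def classify_task_results_py_alt (results : List (String × String)) : List String × List String × List String × List String :=
  results.foldl
    (fun acc p =>
      if p.2 = "failed" then (acc.1 ++ [p.1], acc.2.1, acc.2.2.1, acc.2.2.2)
      else if p.2 = "abandoned" ∨ p.2 = "timed_out" then (acc.1, acc.2.1 ++ [p.1], acc.2.2.1, acc.2.2.2)
      else if p.2 = "skipped" then (acc.1, acc.2.1, acc.2.2.1 ++ [p.1], acc.2.2.2)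
      else if p.2 = "merged" then (acc.1, acc.2.1, acc.2.2.1, acc.2.2.2 ++ [p.1])
      else acc)
    ([], [], [], [])

-- ===== PRECONDITION & SPEC =====
def Spec_classify_task_results_py (results : List (String × String)) (out : List String × List String × List String × List String) : Prop := out = classify_task_results_py_alt results
instance (results : List (String × String)) (out : List String × List String × List String × List String) : Decidable (Spec_classify_task_results_py results out) := by unfold Spec_classify_task_results_py; infer_instance

-- ===== CLAIM (what is proved, stated in full; the proofs are below) =====
def Claim_equal_classify_task_results_py : Prop := ∀ (results : List (String × String)), Dom_classify_task_results_py results → Spec_classify_task_results_py results (classify_task_results_py results)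

-- ===== LEMMAS AND PROOFS =====

-- Loop invariant for B's single fold: starting from (f, a, sk, su) it appends A's four filtered lists.
theorem classify_fold_inv (results : List (String × String))
    (f a sk su : List String) :
    results.foldl
      (fun acc p =>
        if p.2 = "failed" then (acc.1 ++ [p.1], acc.2.1, acc.2.2.1, acc.2.2.2)
        else if p.2 = "abandoned" ∨ p.2 = "timed_out" then (acc.1, acc.2.1 ++ [p.1], acc.2.2.1, acc.2.2.2)
        else if p.2 = "skipped" then (acc.1, acc.2.1, acc.2.2.1 ++ [p.1], acc.2.2.2)
        else if p.2 = "merged" then (acc.1, acc.2.1, acc.2.2.1, acc.2.2.2 ++ [p.1])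
        else acc)
      (f, a, sk, su)
    = (f ++ results.filterMap (fun p => if p.2 = "failed" then some p.1 else none),
       a ++ results.filterMap (fun p => if p.2 = "abandoned" ∨ p.2 = "timed_out" then some p.1 else none),
       sk ++ results.filterMap (fun p => if p.2 = "skipped" then some p.1 else none),
       su ++ results.filterMap (fun p => if p.2 = "merged" then some p.1 else none)) := by
  induction results generalizing f a sk su with
  | nil => simp
  | cons p t ih =>
      obtain ⟨slug, st⟩ := p
      simp only [List.foldl_cons, List.filterMap_cons]
      by_cases h1 : st = "failed"
      · subst h1; simp [ih, List.append_assoc]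
      · by_cases h2 : st = "abandoned" ∨ st = "timed_out"
        · rcases h2 with h2 | h2 <;> subst h2 <;> simp [ih, List.append_assoc]
        · by_cases h3 : st = "skipped"
          · subst h3; simp [ih, List.append_assoc]
          · by_cases h4 : st = "merged"
            · subst h4; simp [ih, List.append_assoc]
            · simp [ih, h1, h2, h3, h4]

-- ===== VERDICT (by name: the statement is the Claim_ definition above) =====
theorem classify_task_results_py_spec : Claim_equal_classify_task_results_py := by
  intro results _
  unfold Spec_classify_task_results_py classify_task_results_py classify_task_results_py_alt
  simp [classify_fold_inv]
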